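-- pv_equiv track=rewrite | github.com/Dr0x3525/Proyecto-final-programacion | ejercicios_parciales/ejercicio_parcial_2/ejercicio3.py | encontrar_segundo_impar
-- ===== SOURCE A (Python) =====
-- def encontrar_segundo_impar(vector):
--     contador_impares = 0
--     for indice in range(len(vector)):
--         if vector[indice] % 2 != 0:
--             contador_impares += 1
--             if contador_impares == 2:
--                 return vector[indice], indice
--     return None, None
-- ===== SOURCE B (Python) =====
-- def encontrar_segundo_impar(vector):
--     odds = [(v, i) for i, v in enumerate(vector) if v % 2 != 0]
--     if len(odds) >= 2:
--         return odds[1]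
--     return None, None
-- ===== Notes on version B (the rewrite author's own statement) =====
-- stated objective: alternative
-- what changed: Replaces the counter/early-exit index loop with a single comprehension that collects all (value, index) pairs of odd elements and then selects position 1, falling back to (None, None) when fewer than two odds exist.
import Mathlib
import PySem

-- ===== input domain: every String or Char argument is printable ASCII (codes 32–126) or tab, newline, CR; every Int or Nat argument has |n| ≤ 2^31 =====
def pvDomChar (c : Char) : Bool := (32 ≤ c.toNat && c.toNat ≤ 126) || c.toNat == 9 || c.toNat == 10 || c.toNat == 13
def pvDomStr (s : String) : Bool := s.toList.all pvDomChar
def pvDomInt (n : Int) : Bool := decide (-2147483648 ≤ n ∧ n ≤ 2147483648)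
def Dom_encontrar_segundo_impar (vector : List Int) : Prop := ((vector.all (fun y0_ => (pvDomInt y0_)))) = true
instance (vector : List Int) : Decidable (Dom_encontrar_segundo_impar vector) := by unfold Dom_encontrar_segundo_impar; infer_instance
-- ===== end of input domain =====

-- B replaces A's counter/early-exit index loop by collecting all (value, index) pairs of odd
-- elements in one comprehension and selecting position 1 (objective: alternative decomposition).

-- ===== PORT A =====
-- loop over range(len(vector)) carrying contador_impares, with early return at the second odd
def encontrar_segundo_impar_go (vector : List Int) (idxs : List Int) (contador : Int) :
    Option Int × Option Int :=
  match idxs with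
  | [] => (none, none)
  | i :: rest =>
    match PySem.List.pyGet? vector i with
    | none => (none, none)   -- unreachable: indices from range(len(vector)) are in range
    | some v =>
      if PySem.Int.mod v 2 ≠ 0 then
        if contador + 1 = 2 then (some v, some i)
        else encontrar_segundo_impar_go vector rest (contador + 1)
      else encontrar_segundo_impar_go vector rest contador

def encontrar_segundo_impar (vector : List Int) : Option Int × Option Int :=
  encontrar_segundo_impar_go vector (PySem.List.pyRange 0 (vector.length : Int) 1) 0

-- ===== PORT B =====
def encontrar_segundo_impar_alt (vector : List Int) : Option Int × Option Int :=
  let odds := ((PySem.List.enumerate vector).filter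
      (fun p => PySem.Int.mod p.2 2 ≠ 0)).map (fun p => (p.2, p.1))
  if 2 ≤ odds.length then
    match odds[1]? with
    | some (v, i) => (some v, some i)
    | none => (none, none)
  else (none, none)

-- ===== PRECONDITION & SPEC =====
def Spec_encontrar_segundo_impar (vector : List Int) (out : Option Int × Option Int) : Prop := out = encontrar_segundo_impar_alt vector
instance (vector : List Int) (out : Option Int × Option Int) : Decidable (Spec_encontrar_segundo_impar vector out) := by unfold Spec_encontrar_segundo_impar; infer_instance

-- ===== CLAIM (what is proved, stated in full; the proofs are below) =====
def Claim_equal_encontrar_segundo_impar : Prop := ∀ (vector : List Int), Dom_encontrar_segundo_impar vector → Spec_encontrar_segundo_impar vector (encontrar_segundo_impar vector)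

-- ===== LEMMAS AND PROOFS =====

-- the (value, index) pairs of odd elements of xs, indices starting at s
def pvOdds (xs : List Int) (s : Int) : List (Int × Int) :=
  ((PySem.List.enumerate xs s).filter (fun p => PySem.Int.mod p.2 2 ≠ 0)).map (fun p => (p.2, p.1))

lemma go_spec : ∀ (xs pre : List Int),
    (encontrar_segundo_impar_go (pre ++ xs)
        (PySem.List.pyRange (pre.length : Int) ((pre ++ xs).length : Int) 1) 1 =
      (match pvOdds xs (pre.length : Int) with
        | (v, i) :: _ => (some v, some i)
        | [] => (none, none))) ∧
    (encontrar_segundo_impar_go (pre ++ xs)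
        (PySem.List.pyRange (pre.length : Int) ((pre ++ xs).length : Int) 1) 0 =
      (match pvOdds xs (pre.length : Int) with
        | _ :: (v, i) :: _ => (some v, some i)
        | _ => (none, none))) := by
  intro xs
  induction xs with
  | nil =>
    intro pre
    have h0 : PySem.List.pyRange (pre.length : Int) ((pre ++ ([] : List Int)).length : Int) 1
        = [] := PySem.List.pyRange_one_eq_nil (by simp)
    refine ⟨?_, ?_⟩
    · rw [h0]
      simp [encontrar_segundo_impar_go, pvOdds, PySem.List.enumerate_nil]
    · rw [h0]
      simp [encontrar_segundo_impar_go, pvOdds, PySem.List.enumerate_nil]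
  | cons x xs ih =>
    intro pre
    have hlt : (pre.length : Int) < ((pre ++ x :: xs).length : Int) := by simp
    rw [PySem.List.pyRange_one_cons hlt]
    have hget : PySem.List.pyGet? (pre ++ x :: xs) (pre.length : Int) = some x :=
      PySem.List.pyGet?_append_length pre xs x
    have ih' := ih (pre ++ [x])
    rw [List.append_assoc] at ih'
    have hlen : ((pre ++ [x]).length : Int) = (pre.length : Int) + 1 := by simp
    rw [hlen] at ih'
    simp only [List.singleton_append] at ih'
    have hcond : (PySem.Int.mod x 2 ≠ 0) ↔ (x % 2 = 1) := by
      simp [PySem.Int.mod, Int.fmod_eq_emod]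
    have hodds : pvOdds (x :: xs) (pre.length : Int) =
        (if x % 2 = 1 then [(x, (pre.length : Int))] else []) ++
          pvOdds xs ((pre.length : Int) + 1) := by
      simp only [pvOdds, PySem.List.enumerate_cons, List.filter_cons]
      by_cases h : x % 2 = 1 <;> simp [h]
    rw [hodds]
    by_cases h : x % 2 = 1
    · rw [if_pos h]
      refine ⟨?_, ?_⟩
      · simp only [encontrar_segundo_impar_go, hget]
        rw [if_pos (hcond.mpr h), if_pos (by norm_num : (1 : Int) + 1 = 2)]
        simp
      · simp only [encontrar_segundo_impar_go, hget]
        rw [if_pos (hcond.mpr h), if_neg (by norm_num : ¬ ((0 : Int) + 1 = 2)),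
          (by norm_num : (0 : Int) + 1 = 1), ih'.1]
        rcases pvOdds xs ((pre.length : Int) + 1) with _ | ⟨⟨v, i⟩, rest⟩ <;> simp
    · rw [if_neg h]
      have hne : ¬ (PySem.Int.mod x 2 ≠ 0) := fun hc => h (hcond.mp hc)
      refine ⟨?_, ?_⟩ <;>
        · simp only [encontrar_segundo_impar_go, hget]
          rw [if_neg hne, List.nil_append]
          first | exact ih'.1 | exact ih'.2

lemma alt_eq_match (vector : List Int) :
    encontrar_segundo_impar_alt vector =
      (match pvOdds vector 0 with
        | _ :: (v, i) :: _ => (some v, some i)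
        | _ => (none, none)) := by
  unfold encontrar_segundo_impar_alt pvOdds
  set odds := ((PySem.List.enumerate vector).filter
      (fun p => PySem.Int.mod p.2 2 ≠ 0)).map (fun p => (p.2, p.1)) with hodds
  match h : odds with
  | [] => simp
  | [p] => simp
  | p :: q :: rest =>
    obtain ⟨v, i⟩ := q
    simp

-- ===== VERDICT (by name: the statement is the Claim_ definition above) =====
theorem encontrar_segundo_impar_spec : Claim_equal_encontrar_segundo_impar := by
  intro vector _
  unfold Spec_encontrar_segundo_impar encontrar_segundo_impar
  rw [alt_eq_match]
  have h := (go_spec vector []).2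
  simpa using h
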